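-- pv_equiv track=rewrite | github.com/yagna-1/open-finetune-config-os | src/ft_config_engine/recommender.py | _mode_or_default
-- ===== SOURCE A (Python) =====
-- def _mode_or_default(values: list[str], default: str) -> str:
--     if not values:
--         return default
--     counts: dict[str, int] = {}
--     for value in values:
--         counts[value] = counts.get(value, 0) + 1
--     max_count = max(counts.values())
--     winners = sorted([value for value, count in counts.items() if count == max_count])
--     return winners[0]
-- ===== SOURCE B (Python) =====
-- def _mode_or_default(values: list[str], default: str) -> str:
--     if not values:
--         return default
--     s = sorted(values)
--     best, best_len = s[0], 1
--     cur, cur_len = s[0], 1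
--     for v in s[1:]:
--         if v == cur:
--             cur_len += 1
--         else:
--             cur, cur_len = v, 1
--         if cur_len > best_len:
--             best, best_len = v, cur_len
--     return best
-- ===== Notes on version B (the rewrite author's own statement) =====
-- stated objective: alternative
-- what changed: Replaced the dict-counting loop + max over counts + filter comprehension + sort of the winners by sorting the values once and doing a single run-length scan that keeps the first (alphabetically smallest) run of maximal length.
import Mathlib
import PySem

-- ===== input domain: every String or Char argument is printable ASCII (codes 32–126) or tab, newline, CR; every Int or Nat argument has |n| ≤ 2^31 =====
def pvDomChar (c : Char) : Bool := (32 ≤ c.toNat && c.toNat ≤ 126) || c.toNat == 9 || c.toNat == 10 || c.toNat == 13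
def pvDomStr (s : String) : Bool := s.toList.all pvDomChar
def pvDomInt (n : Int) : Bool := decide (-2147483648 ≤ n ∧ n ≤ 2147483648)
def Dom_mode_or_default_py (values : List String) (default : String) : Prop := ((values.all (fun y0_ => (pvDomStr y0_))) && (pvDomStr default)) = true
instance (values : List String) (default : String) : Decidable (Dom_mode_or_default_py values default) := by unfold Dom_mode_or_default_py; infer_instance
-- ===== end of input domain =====

-- B replaces A's dict-counting loop + max over counts + filter + sort of the winners by one
-- sort of the values and a single run-length scan keeping the first maximal run — same results.

-- ===== PORT A =====
def mode_or_default_py (values : List String) (default : String) : String :=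
  if values = [] then default
  else
    let counts : PySem.Dict String Int :=
      values.foldl (fun d value => d.insert value (d.getD value 0 + 1)) PySem.Dict.empty
    let max_count : Int :=
      match PySem.List.max? counts.values (fun c => c) with
      | some m => m
      | none => 0   -- unreachable: counts is nonempty since values ≠ []
    let winners :=
      PySem.List.sorted
        (counts.items.filterMap (fun p => if p.2 = max_count then some p.1 else none))
        (fun v => v) false
    match PySem.List.pyGet? winners 0 with
    | some w => w
    | none => default   -- unreachable: winners is nonempty

-- ===== PORT B =====
-- the loop body of B's run-length scan
def pvStepB (acc : String × Int × String × Int) (v : String) : String × Int × String × Int :=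
  let best := acc.1
  let bestLen := acc.2.1
  let cur := acc.2.2.1
  let curLen := acc.2.2.2
  let c := if v = cur then (cur, curLen + 1) else (v, (1 : Int))
  if c.2 > bestLen then (v, c.2, c.1, c.2) else (best, bestLen, c.1, c.2)

def mode_or_default_py_alt (values : List String) (default : String) : String :=
  if values = [] then default
  else
    match PySem.List.sorted values (fun v : String => v) false with
    | [] => default   -- unreachable: sorting a nonempty list is nonempty
    | s0 :: rest => (rest.foldl pvStepB (s0, 1, s0, 1)).1

-- ===== PRECONDITION & SPEC =====
def Spec_mode_or_default_py (values : List String) (default : String) (out : String) : Prop := out = mode_or_default_py_alt values default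
instance (values : List String) (default : String) (out : String) : Decidable (Spec_mode_or_default_py values default out) := by unfold Spec_mode_or_default_py; infer_instance

-- ===== CLAIM (what is proved, stated in full; the proofs are below) =====
def Claim_equal_mode_or_default_py : Prop := ∀ (values : List String) (default : String), Dom_mode_or_default_py values default → Spec_mode_or_default_py values default (mode_or_default_py values default)

-- ===== LEMMAS AND PROOFS =====

-- count of v in values, as Int
def pvCnt (values : List String) (v : String) : Int := (values.count v : Int)

-- "w is THE mode of values with alphabetical tie-break"
def pvIsMode (values : List String) (w : String) : Prop :=
  w ∈ values ∧ ∀ v ∈ values,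
    pvCnt values v < pvCnt values w ∨ (pvCnt values v = pvCnt values w ∧ w ≤ v)

theorem pvIsMode_unique {values : List String} {w1 w2 : String}
    (h1 : pvIsMode values w1) (h2 : pvIsMode values w2) : w1 = w2 := by
  obtain ⟨m1, p1⟩ := h1
  obtain ⟨m2, p2⟩ := h2
  rcases p1 w2 m2 with h | ⟨he, hle⟩
  · rcases p2 w1 m1 with h' | ⟨he', _⟩ <;> omega
  · rcases p2 w1 m1 with h' | ⟨_, hle'⟩
    · omega
    · exact le_antisymm hle hle'

-- invariant of B's scan after processing prefix p (cur is the max of p with its count;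
-- best is the mode of p with alphabetical tie-break, bestLen its count)
def pvInv (p : List String) (st : String × Int × String × Int) : Prop :=
  st.2.2.1 ∈ p ∧ (∀ w ∈ p, w ≤ st.2.2.1) ∧ st.2.2.2 = (p.count st.2.2.1 : Int) ∧
  st.1 ∈ p ∧ st.2.1 = (p.count st.1 : Int) ∧
  ∀ v ∈ p, (p.count v : Int) < st.2.1 ∨ ((p.count v : Int) = st.2.1 ∧ st.1 ≤ v)

theorem pvStepB_inv {p : List String} {v : String} {st : String × Int × String × Int}
    (hinv : pvInv p st) (hle : ∀ w ∈ p, w ≤ v) : pvInv (p ++ [v]) (pvStepB st v) := by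
  obtain ⟨best, bestLen, cur, curLen⟩ := st
  obtain ⟨hcmem, hcmax, hclen, hbmem, hblen, hmode⟩ := hinv
  simp only at hcmem hcmax hclen hbmem hblen hmode
  have hcount : ∀ w : String, (p ++ [v]).count w = p.count w + (if v = w then 1 else 0) := by
    intro w
    simp [List.count_append, List.count_singleton, beq_iff_eq]
  by_cases hvc : v = cur
  · -- v extends the current run
    subst hvc
    have hcnt' : ((p ++ [v]).count v : Int) = curLen + 1 := by
      rw [hcount v, if_pos rfl, hclen]; push_cast; ring
    by_cases hgt : curLen + 1 > bestLen
    · have hst : pvStepB (best, bestLen, v, curLen) v = (v, curLen + 1, v, curLen + 1) := by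
        simp [pvStepB, hgt]
      rw [hst]
      unfold pvInv
      dsimp only
      refine ⟨List.mem_append_right p List.mem_cons_self, ?_, ?_,
        List.mem_append_right p List.mem_cons_self, ?_, ?_⟩
      · intro w hw
        rcases List.mem_append.mp hw with h | h
        · exact hcmax w h
        · simp at h; simp [h]
      · exact hcnt'.symm
      · exact hcnt'.symm
      · intro w hw
        by_cases hwv : v = w
        · subst hwv; exact Or.inr ⟨hcnt', le_refl v⟩
        · left
          rw [hcount w, if_neg hwv]
          have : (p.count w : Int) ≤ bestLen := by
            rcases List.mem_append.mp hw with h | h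
            · rcases hmode w h with h' | h' <;> omega
            · simp at h; exact absurd h.symm hwv
          push_cast; omega
    · have hst : pvStepB (best, bestLen, v, curLen) v = (best, bestLen, v, curLen + 1) := by
        simp [pvStepB, hgt]
      rw [hst]
      unfold pvInv
      dsimp only
      refine ⟨List.mem_append_right p List.mem_cons_self, ?_, ?_, ?_, ?_, ?_⟩
      · intro w hw
        rcases List.mem_append.mp hw with h | h
        · exact hcmax w h
        · simp at h; simp [h]
      · exact hcnt'.symm
      · exact List.mem_append_left _ hbmem
      · by_cases hbveq : v = best
        · exfalso
          rw [← hbveq] at hblen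
          omega
        · rw [hcount best, hblen, if_neg hbveq]; push_cast; ring
      · intro w hw
        rcases List.mem_append.mp hw with h | h
        · by_cases hwv : v = w
          · subst hwv
            rcases lt_or_eq_of_le (by omega : curLen + 1 ≤ bestLen) with h2 | h2
            · left; omega
            · right; exact ⟨by omega, hle best hbmem⟩
          · rw [hcount w, if_neg hwv]
            rcases hmode w h with h' | h'
            · left; push_cast; omega
            · right; exact ⟨by push_cast; omega, h'.2⟩
        · simp at h
          subst h
          rcases lt_or_eq_of_le (by omega : curLen + 1 ≤ bestLen) with h2 | h2
          · left; omega
          · right; exact ⟨by omega, hle best hbmem⟩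
  · -- v starts a new run; v cannot occur in p (it is ≥ the max cur and ≠ cur)
    have hvp : v ∉ p := by
      intro hv
      exact hvc (le_antisymm (hcmax v hv) (hle cur hcmem))
    have hpv0 : p.count v = 0 := List.count_eq_zero.mpr hvp
    have hcnt' : ((p ++ [v]).count v : Int) = 1 := by
      rw [hcount v, if_pos rfl, hpv0]; simp
    have hb1 : (1 : Int) ≤ bestLen := by
      rw [hblen]
      exact_mod_cast List.count_pos_iff.mpr hbmem
    have hgt : ¬ ((1 : Int) > bestLen) := by omega
    have hst : pvStepB (best, bestLen, cur, curLen) v = (best, bestLen, v, 1) := by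
      simp [pvStepB, hvc, hgt]
    rw [hst]
    unfold pvInv
    dsimp only
    refine ⟨List.mem_append_right p List.mem_cons_self, ?_, ?_, ?_, ?_, ?_⟩
    · intro w hw
      rcases List.mem_append.mp hw with h | h
      · exact hle w h
      · simp at h; simp [h]
    · exact hcnt'.symm
    · exact List.mem_append_left _ hbmem
    · rw [hcount best]
      have hbv : v ≠ best := fun h => hvp (h ▸ hbmem)
      rw [if_neg hbv, hblen]; push_cast; ring
    · intro w hw
      rcases List.mem_append.mp hw with h | h
      · by_cases hwv : v = w
        · subst hwv; exact absurd h hvp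
        · rw [hcount w, if_neg hwv]
          rcases hmode w h with h' | h'
          · left; push_cast; omega
          · right; exact ⟨by push_cast; omega, h'.2⟩
      · simp at h
        subst h
        rcases eq_or_lt_of_le hb1 with h' | h'
        · right
          exact ⟨by omega, hle best hbmem⟩
        · left
          omega

theorem pvFoldB_inv :
    ∀ (r p : List String) (st : String × Int × String × Int), pvInv p st →
      (∀ a ∈ p, ∀ b ∈ r, a ≤ b) → r.Pairwise (· ≤ ·) →
      pvInv (p ++ r) (r.foldl pvStepB st) := by
  intro r
  induction r with
  | nil => intro p st h _ _; simpa using h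
  | cons v r' ih =>
    intro p st hinv hcross hpair
    have hstep := pvStepB_inv hinv (fun w hw => hcross w hw v List.mem_cons_self)
    have hcross' : ∀ a ∈ p ++ [v], ∀ b ∈ r', a ≤ b := by
      intro a ha b hb
      rcases List.mem_append.mp ha with h | h
      · exact hcross a h b (List.mem_cons_of_mem v hb)
      · simp at h
        subst h
        exact (List.pairwise_cons.mp hpair).1 b hb
    have := ih (p ++ [v]) (pvStepB st v) hstep hcross' (List.pairwise_cons.mp hpair).2
    simpa [List.append_assoc] using this

-- B's branch for nonempty input returns the mode
theorem pvB_isMode (values : List String) (default : String) (h : values ≠ []) :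
    pvIsMode values (mode_or_default_py_alt values default) := by
  unfold mode_or_default_py_alt
  rw [if_neg h]
  have hsne : PySem.List.sorted values (fun v : String => v) false ≠ [] := by
    intro hnil
    exact h ((PySem.List.sorted_eq_nil_iff _ _ _).mp hnil)
  obtain ⟨s0, rest, hs⟩ := List.exists_cons_of_ne_nil hsne
  rw [hs]
  have hpair : (s0 :: rest).Pairwise (· ≤ ·) := by
    have := PySem.List.sorted_pairwise values (fun v : String => v)
    rwa [hs] at this
  have hinv0 : pvInv [s0] (s0, 1, s0, 1) := by
    refine ⟨List.mem_singleton_self s0, ?_, ?_, List.mem_singleton_self s0, ?_, ?_⟩ <;>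
      simp [List.count_singleton]
  have hinv := pvFoldB_inv rest [s0] (s0, 1, s0, 1) hinv0
    (by
      intro a ha b hb
      simp at ha
      subst ha
      exact (List.pairwise_cons.mp hpair).1 b hb)
    (List.pairwise_cons.mp hpair).2
  rw [List.singleton_append] at hinv
  obtain ⟨-, -, -, hbmem, hblen, hmode⟩ := hinv
  have hperm : (s0 :: rest).Perm values := by
    have := PySem.List.sorted_perm values (fun v : String => v) false
    rwa [hs] at this
  refine ⟨hperm.mem_iff.mp hbmem, ?_⟩
  intro v hv
  have hv' : v ∈ s0 :: rest := hperm.mem_iff.mpr hv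
  have hcnt : ∀ w : String, (s0 :: rest).count w = values.count w := fun w => hperm.count_eq w
  rcases hmode v hv' with h' | h'
  · left
    rw [hblen] at h'
    simp only [pvCnt]
    rw [← hcnt v, ← hcnt _]
    exact_mod_cast h'
  · right
    refine ⟨?_, h'.2⟩
    have := h'.1
    rw [hblen] at this
    simp only [pvCnt]
    rw [← hcnt v, ← hcnt _]
    exact_mod_cast this

-- A's counting loop is collections.Counter
theorem pvCountsA_eq (values : List String) :
    values.foldl (fun d value => d.insert value (d.getD value 0 + 1)) PySem.Dict.empty =
      PySem.Dict.counter values := rfl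

-- A's branch for nonempty input returns the mode
theorem pvA_isMode (values : List String) (default : String) (h : values ≠ []) :
    pvIsMode values (mode_or_default_py values default) := by
  have hks : PySem.Set.ofList values ≠ [] := by
    obtain ⟨x, hx⟩ := List.exists_mem_of_ne_nil values h
    intro hnil
    have := (PySem.Set.mem_ofList values x).mpr hx
    simp [hnil] at this
  unfold mode_or_default_py
  rw [if_neg h]
  simp only [pvCountsA_eq]
  have hitems := PySem.Dict.items_counter values
  have hvals : (PySem.Dict.counter values).values =
      (PySem.Set.ofList values).map (fun k => (List.count k values : Int)) := by
    simp [PySem.Dict.values, hitems, List.map_map, Function.comp]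
  simp only [hvals, hitems]
  cases hM : PySem.List.max?
      ((PySem.Set.ofList values).map (fun k => (List.count k values : Int)))
      (fun c => c) with
  | none =>
    exact absurd ((PySem.List.max?_eq_none_iff _ _).mp hM) (by simp [hks])
  | some M =>
    have hmax : ∀ k ∈ PySem.Set.ofList values, (List.count k values : Int) ≤ M := by
      intro k hk
      exact PySem.List.max?_isMax hM _ (List.mem_map_of_mem hk)
    obtain ⟨k0, hk0, hk0M⟩ := List.mem_map.mp (PySem.List.max?_mem hM)
    have hwmem : ∀ x : String,
        x ∈ ((PySem.Set.ofList values).map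
              (fun k => (k, (List.count k values : Int)))).filterMap
            (fun p => if p.2 = M then some p.1 else none) ↔
          x ∈ PySem.Set.ofList values ∧ (List.count x values : Int) = M := by
      intro x
      simp only [List.filterMap_map, List.mem_filterMap, Function.comp]
      constructor
      · rintro ⟨k, hk, hfk⟩
        by_cases hck : (List.count k values : Int) = M
        · rw [if_pos hck] at hfk
          exact (Option.some.inj hfk) ▸ ⟨hk, hck⟩
        · simp [hck] at hfk
      · rintro ⟨hx, hcx⟩
        exact ⟨x, hx, by simp [hcx]⟩
    have hne : ((PySem.Set.ofList values).map
          (fun k => (k, (List.count k values : Int)))).filterMap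
        (fun p => if p.2 = M then some p.1 else none) ≠ [] :=
      List.ne_nil_of_mem ((hwmem k0).mpr ⟨hk0, hk0M⟩)
    have hsne : PySem.List.sorted
        (((PySem.Set.ofList values).map
            (fun k => (k, (List.count k values : Int)))).filterMap
          (fun p => if p.2 = M then some p.1 else none))
        (fun v : String => v) false ≠ [] := by
      intro hnil
      exact hne ((PySem.List.sorted_eq_nil_iff _ _ _).mp hnil)
    obtain ⟨w, t, hwt⟩ := List.exists_cons_of_ne_nil hsne
    rw [hwt]
    have hget : PySem.List.pyGet? (w :: t) (0 : Int) = some w := by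
      simp [PySem.List.pyGet?, PySem.List.pyIdx?]
    rw [hget]
    have hwin : w ∈ ((PySem.Set.ofList values).map
          (fun k => (k, (List.count k values : Int)))).filterMap
        (fun p => if p.2 = M then some p.1 else none) := by
      rw [← PySem.List.mem_sorted _ (fun v : String => v) false, hwt]
      exact List.mem_cons_self
    obtain ⟨hwks, hwM⟩ := (hwmem w).mp hwin
    have hleast := PySem.List.key_head_sorted_le _ (fun v : String => v) hwt
    refine ⟨(PySem.Set.mem_ofList values w).mp hwks, ?_⟩
    intro v hv
    have hvks : v ∈ PySem.Set.ofList values := (PySem.Set.mem_ofList values v).mpr hv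
    have hle : pvCnt values v ≤ pvCnt values w := by
      simpa [pvCnt, hwM] using hmax v hvks
    rcases lt_or_eq_of_le hle with h' | h'
    · exact Or.inl h'
    · refine Or.inr ⟨h', hleast v ((hwmem v).mpr ⟨hvks, ?_⟩)⟩
      simpa [pvCnt, hwM] using h'

-- ===== VERDICT (by name: the statement is the Claim_ definition above) =====
theorem mode_or_default_py_spec : Claim_equal_mode_or_default_py := by
  intro values default _
  unfold Spec_mode_or_default_py
  by_cases h : values = []
  · subst h
    simp [mode_or_default_py, mode_or_default_py_alt]
  · exact pvIsMode_unique (pvA_isMode values default h) (pvB_isMode values default h)
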